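-- pv_equiv track=rewrite | github.com/CMU-SAFARI/BreakHammer | scripts/calc_rh_parameters.py | get_rfmplus_parameters
-- ===== SOURCE A (Python) =====
-- def get_rfmplus_parameters(tRH):
--     nrh_rfm_pairs = [
--         (16, 1),
--         (20, 2),
--         (32, 3),
--         (64, 6),
--         (128, 13),
--         (256, 27),
--         (512, 60),
--         (1024, 128),
--         (2048, 256),
--         (4096, 8192)
--     ]
--     for nrh, rfmth in nrh_rfm_pairs:
--         if tRH <= nrh:
--             return rfmth
--     return 8192
-- ===== SOURCE B (Python) =====
-- import bisect
--
-- _THRESHOLDS = [16, 20, 32, 64, 128, 256, 512, 1024, 2048, 4096]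
-- _VALUES = [1, 2, 3, 6, 13, 27, 60, 128, 256, 8192]
--
-- def get_rfmplus_parameters(tRH):
--     i = bisect.bisect_left(_THRESHOLDS, tRH)
--     return _VALUES[i] if i < len(_THRESHOLDS) else 8192
-- ===== Notes on version B (the rewrite author's own statement) =====
-- stated objective: idiomatic
-- what changed: Replaces the sequential scan over threshold/value pairs with a binary search (bisect_left) over a sorted threshold table indexing a parallel value list.
import Mathlib
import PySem

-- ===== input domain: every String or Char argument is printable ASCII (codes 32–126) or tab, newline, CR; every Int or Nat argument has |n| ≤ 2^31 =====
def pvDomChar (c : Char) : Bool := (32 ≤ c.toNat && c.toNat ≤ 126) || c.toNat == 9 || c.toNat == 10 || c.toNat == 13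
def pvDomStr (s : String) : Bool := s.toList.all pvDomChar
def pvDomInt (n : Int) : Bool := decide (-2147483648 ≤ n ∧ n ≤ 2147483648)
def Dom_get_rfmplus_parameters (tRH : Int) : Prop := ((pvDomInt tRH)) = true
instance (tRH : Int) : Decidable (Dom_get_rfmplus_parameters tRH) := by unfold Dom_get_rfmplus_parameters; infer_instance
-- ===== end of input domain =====

-- B replaces A's sequential scan with a bisect_left binary search over a sorted
-- threshold table and a parallel value list (idiomatic; same outputs).

-- ===== PORT A =====
-- the for-loop with early return, as structural recursion over the pair list
def pvLoopA : List (Int × Int) → Int → Int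
  | [], _ => 8192
  | (nrh, rfmth) :: rest, tRH => if tRH ≤ nrh then rfmth else pvLoopA rest tRH

def get_rfmplus_parameters (tRH : Int) : Int :=
  pvLoopA [(16, 1), (20, 2), (32, 3), (64, 6), (128, 13), (256, 27),
           (512, 60), (1024, 128), (2048, 256), (4096, 8192)] tRH

-- ===== PORT B =====
def pvThresholds : List Int := [16, 20, 32, 64, 128, 256, 512, 1024, 2048, 4096]
def pvValues : List Int := [1, 2, 3, 6, 13, 27, 60, 128, 256, 8192]

-- bisect.bisect_left(xs, x) on lo..hi, as in CPython; the fuel argument only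
-- makes the halving loop structurally recursive (hi - lo shrinks each step,
-- so fuel = hi suffices) and never changes the computed value
def pvBLGo (xs : List Int) (x : Int) : Nat → Nat → Nat → Nat
  | 0, lo, _ => lo
  | fuel + 1, lo, hi =>
    if lo < hi then
      let mid := (lo + hi) / 2
      if xs.getD mid 0 < x then pvBLGo xs x fuel (mid + 1) hi
      else pvBLGo xs x fuel lo mid
    else lo

def pvBisectLeft (xs : List Int) (x : Int) : Nat :=
  pvBLGo xs x xs.length 0 xs.length

def get_rfmplus_parameters_alt (tRH : Int) : Int :=
  let i := pvBisectLeft pvThresholds tRH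
  if i < pvThresholds.length then pvValues.getD i 0 else 8192

-- ===== PRECONDITION & SPEC =====
def Spec_get_rfmplus_parameters (tRH : Int) (out : Int) : Prop := out = get_rfmplus_parameters_alt tRH
instance (tRH : Int) (out : Int) : Decidable (Spec_get_rfmplus_parameters tRH out) := by unfold Spec_get_rfmplus_parameters; infer_instance

-- ===== CLAIM (what is proved, stated in full; the proofs are below) =====
def Claim_equal_get_rfmplus_parameters : Prop := ∀ (tRH : Int), Dom_get_rfmplus_parameters tRH → Spec_get_rfmplus_parameters tRH (get_rfmplus_parameters tRH)

-- ===== LEMMAS AND PROOFS =====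
-- bottom-up evaluation of the binary search on the concrete table
theorem bl_self (xs : List Int) (x : Int) (f lo : Nat) : pvBLGo xs x f lo lo = lo := by
  cases f <;> simp [pvBLGo]

theorem bl_9_10 (x : Int) (f : Nat) : pvBLGo [16, 20, 32, 64, 128, 256, 512, 1024, 2048, 4096] x (f + 1) 9 10 = if 4096 < x then 10 else 9 := by
  simp only [pvBLGo]; norm_num [List.getD, bl_self]

theorem bl_6_7 (x : Int) (f : Nat) : pvBLGo [16, 20, 32, 64, 128, 256, 512, 1024, 2048, 4096] x (f + 1) 6 7 = if 512 < x then 7 else 6 := by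
  simp only [pvBLGo]; norm_num [List.getD, bl_self]

theorem bl_6_8 (x : Int) (f : Nat) : pvBLGo [16, 20, 32, 64, 128, 256, 512, 1024, 2048, 4096] x (f + 2) 6 8 =
    if 1024 < x then 8 else if 512 < x then 7 else 6 := by
  simp only [pvBLGo]; norm_num [List.getD, bl_self, bl_6_7]

theorem bl_6_10 (x : Int) (f : Nat) : pvBLGo [16, 20, 32, 64, 128, 256, 512, 1024, 2048, 4096] x (f + 3) 6 10 =
    if 2048 < x then (if 4096 < x then 10 else 9)
    else if 1024 < x then 8 else if 512 < x then 7 else 6 := by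
  simp only [pvBLGo]; norm_num [List.getD, bl_self, bl_9_10, bl_6_8]

theorem bl_0_1 (x : Int) (f : Nat) : pvBLGo [16, 20, 32, 64, 128, 256, 512, 1024, 2048, 4096] x (f + 1) 0 1 = if 16 < x then 1 else 0 := by
  simp only [pvBLGo]; norm_num [List.getD, bl_self]

theorem bl_0_2 (x : Int) (f : Nat) : pvBLGo [16, 20, 32, 64, 128, 256, 512, 1024, 2048, 4096] x (f + 2) 0 2 =
    if 20 < x then 2 else if 16 < x then 1 else 0 := by
  simp only [pvBLGo]; norm_num [List.getD, bl_self, bl_0_1]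

theorem bl_3_4 (x : Int) (f : Nat) : pvBLGo [16, 20, 32, 64, 128, 256, 512, 1024, 2048, 4096] x (f + 1) 3 4 = if 64 < x then 4 else 3 := by
  simp only [pvBLGo]; norm_num [List.getD, bl_self]

theorem bl_3_5 (x : Int) (f : Nat) : pvBLGo [16, 20, 32, 64, 128, 256, 512, 1024, 2048, 4096] x (f + 2) 3 5 =
    if 128 < x then 5 else if 64 < x then 4 else 3 := by
  simp only [pvBLGo]; norm_num [List.getD, bl_self, bl_3_4]

theorem bl_0_5 (x : Int) (f : Nat) : pvBLGo [16, 20, 32, 64, 128, 256, 512, 1024, 2048, 4096] x (f + 3) 0 5 =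
    if 32 < x then (if 128 < x then 5 else if 64 < x then 4 else 3)
    else if 20 < x then 2 else if 16 < x then 1 else 0 := by
  simp only [pvBLGo]; norm_num [List.getD, bl_self, bl_3_5, bl_0_2]

theorem bl_0_10 (x : Int) (f : Nat) : pvBLGo [16, 20, 32, 64, 128, 256, 512, 1024, 2048, 4096] x (f + 4) 0 10 =
    if 256 < x then
      (if 2048 < x then (if 4096 < x then 10 else 9)
       else if 1024 < x then 8 else if 512 < x then 7 else 6)
    else
      (if 32 < x then (if 128 < x then 5 else if 64 < x then 4 else 3)
       else if 20 < x then 2 else if 16 < x then 1 else 0) := by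
  simp only [pvBLGo]; norm_num [List.getD, bl_self, bl_6_10, bl_0_5]

-- ===== VERDICT (by name: the statement is the Claim_ definition above) =====
theorem get_rfmplus_parameters_spec : Claim_equal_get_rfmplus_parameters := by
  intro tRH _
  unfold Spec_get_rfmplus_parameters get_rfmplus_parameters get_rfmplus_parameters_alt
  unfold pvBisectLeft
  have hlen : pvThresholds.length = 10 := by norm_num [pvThresholds]
  rw [hlen]
  simp only [pvThresholds]
  have h10 := bl_0_10 tRH 6
  norm_num at h10
  rw [h10]
  simp only [pvLoopA, pvValues]
  by_cases h0 : tRH ≤ 16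
  · norm_num [List.getD, h0, show ¬((16:Int) < tRH) by omega, show ¬((20:Int) < tRH) by omega, show ¬((32:Int) < tRH) by omega, show ¬((64:Int) < tRH) by omega, show ¬((128:Int) < tRH) by omega, show ¬((256:Int) < tRH) by omega, show ¬((512:Int) < tRH) by omega, show ¬((1024:Int) < tRH) by omega, show ¬((2048:Int) < tRH) by omega, show ¬((4096:Int) < tRH) by omega]
  by_cases h1 : tRH ≤ 20
  · norm_num [List.getD, h0, h1, show (16:Int) < tRH by omega, show ¬((20:Int) < tRH) by omega, show ¬((32:Int) < tRH) by omega, show ¬((64:Int) < tRH) by omega, show ¬((128:Int) < tRH) by omega, show ¬((256:Int) < tRH) by omega, show ¬((512:Int) < tRH) by omega, show ¬((1024:Int) < tRH) by omega, show ¬((2048:Int) < tRH) by omega, show ¬((4096:Int) < tRH) by omega]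
  by_cases h2 : tRH ≤ 32
  · norm_num [List.getD, h0, h1, h2, show (16:Int) < tRH by omega, show (20:Int) < tRH by omega, show ¬((32:Int) < tRH) by omega, show ¬((64:Int) < tRH) by omega, show ¬((128:Int) < tRH) by omega, show ¬((256:Int) < tRH) by omega, show ¬((512:Int) < tRH) by omega, show ¬((1024:Int) < tRH) by omega, show ¬((2048:Int) < tRH) by omega, show ¬((4096:Int) < tRH) by omega]
  by_cases h3 : tRH ≤ 64
  · norm_num [List.getD, h0, h1, h2, h3, show (16:Int) < tRH by omega, show (20:Int) < tRH by omega, show (32:Int) < tRH by omega, show ¬((64:Int) < tRH) by omega, show ¬((128:Int) < tRH) by omega, show ¬((256:Int) < tRH) by omega, show ¬((512:Int) < tRH) by omega, show ¬((1024:Int) < tRH) by omega, show ¬((2048:Int) < tRH) by omega, show ¬((4096:Int) < tRH) by omega]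
  by_cases h4 : tRH ≤ 128
  · norm_num [List.getD, h0, h1, h2, h3, h4, show (16:Int) < tRH by omega, show (20:Int) < tRH by omega, show (32:Int) < tRH by omega, show (64:Int) < tRH by omega, show ¬((128:Int) < tRH) by omega, show ¬((256:Int) < tRH) by omega, show ¬((512:Int) < tRH) by omega, show ¬((1024:Int) < tRH) by omega, show ¬((2048:Int) < tRH) by omega, show ¬((4096:Int) < tRH) by omega]
  by_cases h5 : tRH ≤ 256
  · norm_num [List.getD, h0, h1, h2, h3, h4, h5, show (16:Int) < tRH by omega, show (20:Int) < tRH by omega, show (32:Int) < tRH by omega, show (64:Int) < tRH by omega, show (128:Int) < tRH by omega, show ¬((256:Int) < tRH) by omega, show ¬((512:Int) < tRH) by omega, show ¬((1024:Int) < tRH) by omega, show ¬((2048:Int) < tRH) by omega, show ¬((4096:Int) < tRH) by omega]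
  by_cases h6 : tRH ≤ 512
  · norm_num [List.getD, h0, h1, h2, h3, h4, h5, h6, show (16:Int) < tRH by omega, show (20:Int) < tRH by omega, show (32:Int) < tRH by omega, show (64:Int) < tRH by omega, show (128:Int) < tRH by omega, show (256:Int) < tRH by omega, show ¬((512:Int) < tRH) by omega, show ¬((1024:Int) < tRH) by omega, show ¬((2048:Int) < tRH) by omega, show ¬((4096:Int) < tRH) by omega]
  by_cases h7 : tRH ≤ 1024
  · norm_num [List.getD, h0, h1, h2, h3, h4, h5, h6, h7, show (16:Int) < tRH by omega, show (20:Int) < tRH by omega, show (32:Int) < tRH by omega, show (64:Int) < tRH by omega, show (128:Int) < tRH by omega, show (256:Int) < tRH by omega, show (512:Int) < tRH by omega, show ¬((1024:Int) < tRH) by omega, show ¬((2048:Int) < tRH) by omega, show ¬((4096:Int) < tRH) by omega]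
  by_cases h8 : tRH ≤ 2048
  · norm_num [List.getD, h0, h1, h2, h3, h4, h5, h6, h7, h8, show (16:Int) < tRH by omega, show (20:Int) < tRH by omega, show (32:Int) < tRH by omega, show (64:Int) < tRH by omega, show (128:Int) < tRH by omega, show (256:Int) < tRH by omega, show (512:Int) < tRH by omega, show (1024:Int) < tRH by omega, show ¬((2048:Int) < tRH) by omega, show ¬((4096:Int) < tRH) by omega]
  by_cases h9 : tRH ≤ 4096
  · norm_num [List.getD, h0, h1, h2, h3, h4, h5, h6, h7, h8, h9, show (16:Int) < tRH by omega, show (20:Int) < tRH by omega, show (32:Int) < tRH by omega, show (64:Int) < tRH by omega, show (128:Int) < tRH by omega, show (256:Int) < tRH by omega, show (512:Int) < tRH by omega, show (1024:Int) < tRH by omega, show (2048:Int) < tRH by omega, show ¬((4096:Int) < tRH) by omega]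
  · norm_num [List.getD, h0, h1, h2, h3, h4, h5, h6, h7, h8, h9, show (16:Int) < tRH by omega, show (20:Int) < tRH by omega, show (32:Int) < tRH by omega, show (64:Int) < tRH by omega, show (128:Int) < tRH by omega, show (256:Int) < tRH by omega, show (512:Int) < tRH by omega, show (1024:Int) < tRH by omega, show (2048:Int) < tRH by omega, show (4096:Int) < tRH by omega]
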